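-- pv_equiv track=rewrite | github.com/sorsater/advent_of_code | 2015/05.py | classify_string_1
-- ===== SOURCE A (Python) =====
-- def classify_string_1(string):
--     vow_cnt = 0
--     for vowel in 'aeiou':
--         vow_cnt += string.count(vowel)
--
--     if vow_cnt < 3:
--         return False
--
--     for part in ['ab', 'cd', 'pq', 'xy']:
--         if part in string:
--             return False
--
--     for i in range(1, len(string)):
--         if string[i-1] == string[i]:
--             break
--     else:
--         return False
--
--     return True
-- ===== SOURCE B (Python) =====
-- def classify_string_1(string):
--     vow_cnt = 0
--     has_double = False
--     has_forbidden = False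
--     prev = None
--     for ch in string:
--         if ch in 'aeiou':
--             vow_cnt += 1
--         if prev is not None:
--             if prev == ch:
--                 has_double = True
--             if (prev, ch) in (('a', 'b'), ('c', 'd'), ('p', 'q'), ('x', 'y')):
--                 has_forbidden = True
--         prev = ch
--     return vow_cnt >= 3 and not has_forbidden and has_double
-- ===== Notes on version B (the rewrite author's own statement) =====
-- stated objective: alternative
-- what changed: A makes four separate passes over the string (five count() scans, four substring searches, and an index loop); B is a single left-to-right pass maintaining a vowel counter, a has_double flag and a has_forbidden flag from each character and its predecessor.
import Mathlib
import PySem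

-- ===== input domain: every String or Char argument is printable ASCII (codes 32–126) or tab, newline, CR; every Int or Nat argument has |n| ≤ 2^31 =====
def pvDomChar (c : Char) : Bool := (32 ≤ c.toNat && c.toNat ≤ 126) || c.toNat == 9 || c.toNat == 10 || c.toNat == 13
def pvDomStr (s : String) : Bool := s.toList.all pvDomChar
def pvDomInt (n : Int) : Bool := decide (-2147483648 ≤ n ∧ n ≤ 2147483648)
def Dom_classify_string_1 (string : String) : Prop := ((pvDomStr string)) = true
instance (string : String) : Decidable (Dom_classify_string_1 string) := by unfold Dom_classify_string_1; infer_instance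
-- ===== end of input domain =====

-- B fuses A's four separate scans into one left-to-right pass with running state; same O(n) cost, different structure.

-- ===== PORT A =====
def classify_string_1 (string : String) : Bool :=
  -- vow_cnt = 0; for vowel in 'aeiou': vow_cnt += string.count(vowel)
  let vow_cnt : Int :=
    "aeiou".toList.foldl (fun acc v => acc + (PySem.Str.count string (String.ofList [v]) : Int)) 0
  if vow_cnt < 3 then false
  -- for part in ['ab','cd','pq','xy']: if part in string: return False
  else if (["ab", "cd", "pq", "xy"] : List String).any (fun part => PySem.Str.isIn part string) then false
  -- for i in range(1, len(string)): if string[i-1] == string[i]: break / else: return False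
  else if (PySem.List.pyRange 1 (PySem.Str.len string) 1).any
      (fun i => PySem.Str.pyGet? string (i - 1) == PySem.Str.pyGet? string i) then true
  else false

-- ===== PORT B =====
-- one step of B's single pass: state = (prev, vow_cnt, has_double, has_forbidden)
def pvStep (st : Option Char × Int × Bool × Bool) (ch : Char) : Option Char × Int × Bool × Bool :=
  let vc := if ch ∈ ['a', 'e', 'i', 'o', 'u'] then st.2.1 + 1 else st.2.1
  match st.1 with
  | none => (some ch, vc, st.2.2.1, st.2.2.2)
  | some p =>
      (some ch, vc,
        st.2.2.1 || (p == ch),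
        st.2.2.2 || ([('a','b'), ('c','d'), ('p','q'), ('x','y')].contains (p, ch)))

def classify_string_1_alt (string : String) : Bool :=
  let r := string.toList.foldl pvStep (none, 0, false, false)
  decide (3 ≤ r.2.1) && !r.2.2.2 && r.2.2.1

-- ===== PRECONDITION & SPEC =====
def Spec_classify_string_1 (string : String) (out : Bool) : Prop := out = classify_string_1_alt string
instance (string : String) (out : Bool) : Decidable (Spec_classify_string_1 string out) := by unfold Spec_classify_string_1; infer_instance

-- ===== CLAIM (what is proved, stated in full; the proofs are below) =====
def Claim_equal_classify_string_1 : Prop := ∀ (string : String), Dom_classify_string_1 string → Spec_classify_string_1 string (classify_string_1 string)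

-- ===== LEMMAS AND PROOFS =====

-- the adjacent pairs of a list
def pvPairs (cs : List Char) : List (Char × Char) := cs.zip cs.tail

lemma pvPairs_mem (cs : List Char) (x y : Char) :
    (x, y) ∈ pvPairs cs ↔ ∃ k, ∃ _ : k + 1 < cs.length, cs[k] = x ∧ cs[k+1] = y := by
  unfold pvPairs
  rw [List.mem_iff_getElem]
  constructor
  · rintro ⟨k, hk, hq⟩
    simp [List.length_zip, List.length_tail] at hk
    refine ⟨k, by omega, ?_⟩
    rw [List.getElem_zip] at hq
    have : cs.tail[k]'(by simp [List.length_tail]; omega) = cs[k+1]'(by omega) := by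
      simp [List.getElem_tail]
    rw [this] at hq
    exact ⟨congrArg Prod.fst hq, congrArg Prod.snd hq⟩
  · rintro ⟨k, hk, h1, h2⟩
    refine ⟨k, by simp [List.length_zip, List.length_tail]; omega, ?_⟩
    rw [List.getElem_zip]
    have : cs.tail[k]'(by simp [List.length_tail]; omega) = cs[k+1]'(by omega) := by
      simp [List.getElem_tail]
    rw [this, h1, h2]

-- a two-character infix is exactly an adjacent pair
lemma pvInfix_pair (cs : List Char) (x y : Char) :
    [x, y] <:+: cs ↔ (x, y) ∈ pvPairs cs := by
  rw [pvPairs_mem]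
  constructor
  · rintro ⟨p, q, rfl⟩
    refine ⟨p.length, by simp, ?_, ?_⟩
    · simp
    · simp
  · rintro ⟨k, hk, h1, h2⟩
    refine ⟨cs.take k, cs.drop (k+2), ?_⟩
    have e1 : cs.drop k = cs[k] :: cs.drop (k+1) := List.drop_eq_getElem_cons (by omega)
    have e2 : cs.drop (k+1) = cs[k+1] :: cs.drop (k+2) := List.drop_eq_getElem_cons (by omega)
    calc cs.take k ++ [x, y] ++ cs.drop (k+2)
        = cs.take k ++ cs.drop k := by rw [e1, e2, h1, h2]; simp
      _ = cs := List.take_append_drop k cs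

-- A's index loop over range(1, len) finds an adjacent equal pair
lemma pvRange_double (s : String) :
    (PySem.List.pyRange 1 (PySem.Str.len s) 1).any
        (fun i => PySem.Str.pyGet? s (i - 1) == PySem.Str.pyGet? s i)
      = (pvPairs s.toList).any (fun q => q.1 == q.2) := by
  rw [Bool.eq_iff_iff, List.any_eq_true, List.any_eq_true]
  constructor
  · rintro ⟨i, hi, hbeq⟩
    rw [PySem.List.mem_pyRange_one] at hi
    simp only [PySem.Str.len_eq] at hi
    obtain ⟨h1, h2⟩ := hi
    set k : Nat := (i - 1).toNat with hk
    have hik : i = (k : Int) + 1 := by omega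
    have hklt : k + 1 < s.toList.length := by omega
    simp only [hik, PySem.Str.pyGet?_natCast, add_sub_cancel_right] at hbeq
    have : ((k : Int) + 1) = ((k + 1 : Nat) : Int) := by push_cast; ring
    rw [this, PySem.Str.pyGet?_natCast] at hbeq
    have e1 : s.toList[k]? = some (s.toList[k]'(by omega)) := List.getElem?_eq_getElem (by omega)
    have e2 : s.toList[k+1]? = some (s.toList[k+1]'hklt) := List.getElem?_eq_getElem hklt
    rw [e1, e2] at hbeq
    have heq : s.toList[k]'(by omega) = s.toList[k+1]'hklt := by simpa using hbeq
    refine ⟨(s.toList[k]'(by omega), s.toList[k+1]'hklt), ?_, by simpa using heq⟩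
    rw [pvPairs_mem]
    exact ⟨k, hklt, rfl, rfl⟩
  · rintro ⟨⟨x, y⟩, hmem, hbeq⟩
    rw [pvPairs_mem] at hmem
    obtain ⟨k, hklt, h1, h2⟩ := hmem
    refine ⟨(k : Int) + 1, ?_, ?_⟩
    · rw [PySem.List.mem_pyRange_one]
      simp only [PySem.Str.len_eq]
      omega
    · have hsub : ((k : Int) + 1 - 1) = ((k : Nat) : Int) := by ring
      have hcast : ((k : Int) + 1) = ((k + 1 : Nat) : Int) := by push_cast; ring
      rw [hsub, hcast]
      simp only [PySem.Str.pyGet?_natCast]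
      rw [List.getElem?_eq_getElem (show k < s.toList.length by omega), List.getElem?_eq_getElem hklt]
      simp only [h1, h2]
      simpa using hbeq

-- B's single pass, characterised component by component
lemma pvFold_spec (cs : List Char) (p : Option Char) (vc : Int) (hd hf : Bool) :
    cs.foldl pvStep (p, vc, hd, hf) =
      ((cs.getLast?).or p,
       vc + (cs.countP (· ∈ ['a','e','i','o','u']) : Int),
       hd || (pvPairs (match p with | none => cs | some c => c :: cs)).any (fun q => q.1 == q.2),
       hf || (pvPairs (match p with | none => cs | some c => c :: cs)).any
              (fun q => [('a','b'), ('c','d'), ('p','q'), ('x','y')].contains q)) := by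
  induction cs generalizing p vc hd hf with
  | nil => cases p <;> simp [pvPairs]
  | cons c t ih =>
    cases p with
    | none =>
      rw [List.foldl_cons, ih]
      simp only [pvStep]
      cases t with
      | nil => simp [pvPairs]; split_ifs <;> omega
      | cons d t' =>
        simp [pvPairs, List.countP_cons, List.getLast?_cons]
        split_ifs <;> omega
    | some a =>
      rw [List.foldl_cons, ih]
      simp only [pvStep]
      cases t with
      | nil =>
        simp [pvPairs]
        split_ifs <;> omega
      | cons d t' =>
        simp [pvPairs, List.countP_cons, List.getLast?_cons]
        split_ifs <;> ring_nf <;> simp [Bool.or_assoc]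

-- the vowel countP splits into the five counts A accumulates
lemma pvCountP_vowelsN (cs : List Char) :
    cs.countP (· ∈ ['a','e','i','o','u']) =
      cs.count 'a' + cs.count 'e' + cs.count 'i' + cs.count 'o' + cs.count 'u' := by
  induction cs with
  | nil => simp
  | cons c t ih =>
    simp only [List.countP_cons, List.count_cons, ih]
    by_cases h : c ∈ ['a','e','i','o','u']
    · simp only [List.mem_cons, List.not_mem_nil, or_false] at h
      rcases h with h|h|h|h|h <;> subst h <;> simp <;> omega
    · simp only [List.mem_cons, List.not_mem_nil, or_false, not_or] at h
      obtain ⟨h1,h2,h3,h4,h5⟩ := h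
      simp [h1,h2,h3,h4,h5, List.mem_cons]

-- count.go on a single-character needle is list count
lemma pvGo_single (v : Char) : ∀ (s : List Char) (acc : Nat),
    PySem.Chars.count.go [v] s.length s acc = acc + s.count v := by
  intro s
  induction s with
  | nil => intro acc; simp [PySem.Chars.count.go]
  | cons h t ih =>
    intro acc
    simp only [List.length_cons, PySem.Chars.count.go, List.isPrefixOf, List.count_cons]
    by_cases hv : v = h
    · subst hv
      simp [ih]
      omega
    · have : (v == h) = false := by simp [hv]
      simp [this, ih, Ne.symm hv]

-- single-character count is list count
lemma pvCount_single (cs : List Char) (v : Char) :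
    PySem.Chars.count cs [v] = cs.count v := by
  unfold PySem.Chars.count
  simp only [List.isEmpty_cons]
  simpa using pvGo_single v cs 0

-- A's forbidden-substring scan equals B's forbidden-pair flag
lemma pvForbidden (s : String) :
    ((["ab", "cd", "pq", "xy"] : List String).any (fun part => PySem.Str.isIn part s))
      = (pvPairs s.toList).any (fun q => [('a','b'), ('c','d'), ('p','q'), ('x','y')].contains q) := by
  rw [Bool.eq_iff_iff, List.any_eq_true, List.any_eq_true]
  constructor
  · rintro ⟨part, hpart, hIn⟩
    rw [PySem.Str.isIn_iff_infix] at hIn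
    simp only [List.mem_cons, List.not_mem_nil, or_false] at hpart
    rcases hpart with h|h|h|h <;> subst h <;>
      simp only [show ("ab" : String).toList = ['a','b'] from rfl,
                 show ("cd" : String).toList = ['c','d'] from rfl,
                 show ("pq" : String).toList = ['p','q'] from rfl,
                 show ("xy" : String).toList = ['x','y'] from rfl] at hIn <;>
      rw [pvInfix_pair] at hIn
    · exact ⟨('a','b'), hIn, by decide⟩
    · exact ⟨('c','d'), hIn, by decide⟩
    · exact ⟨('p','q'), hIn, by decide⟩
    · exact ⟨('x','y'), hIn, by decide⟩
  · rintro ⟨q, hq, hc⟩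
    have hq4 : q ∈ [('a','b'), ('c','d'), ('p','q'), ('x','y')] := by
      simpa using hc
    simp only [List.mem_cons, List.not_mem_nil, or_false] at hq4
    rcases hq4 with h|h|h|h <;> subst h
    · exact ⟨"ab", by simp, by rw [PySem.Str.isIn_iff_infix]; exact (pvInfix_pair _ _ _).2 hq⟩
    · exact ⟨"cd", by simp, by rw [PySem.Str.isIn_iff_infix]; exact (pvInfix_pair _ _ _).2 hq⟩
    · exact ⟨"pq", by simp, by rw [PySem.Str.isIn_iff_infix]; exact (pvInfix_pair _ _ _).2 hq⟩
    · exact ⟨"xy", by simp, by rw [PySem.Str.isIn_iff_infix]; exact (pvInfix_pair _ _ _).2 hq⟩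

-- ===== VERDICT (by name: the statement is the Claim_ definition above) =====
theorem classify_string_1_spec : Claim_equal_classify_string_1 := by
  intro s _
  unfold Spec_classify_string_1 classify_string_1 classify_string_1_alt
  rw [pvFold_spec]
  have hv : "aeiou".toList.foldl
        (fun acc v => acc + (PySem.Str.count s (String.ofList [v]) : Int)) 0
      = (0 : Int) + (s.toList.countP (· ∈ ['a','e','i','o','u']) : Int) := by
    simp only [show ("aeiou" : String).toList = ['a','e','i','o','u'] from rfl, List.foldl]
    rw [pvCountP_vowelsN]
    simp [pvCount_single]
  rw [hv, pvForbidden, pvRange_double]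
  simp only []
  set V := (0 : Int) + (s.toList.countP (· ∈ ['a','e','i','o','u']) : Int)
  set F := (pvPairs s.toList).any (fun q => [('a','b'), ('c','d'), ('p','q'), ('x','y')].contains q)
  set D := (pvPairs s.toList).any (fun q => q.1 == q.2)
  by_cases h1 : V < 3 <;> cases F <;> cases D <;> simp [h1] <;> omega
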